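-- pv_equiv track=rewrite | github.com/rmrajesofficial/Line-Encoder-and-Decoder-Project | DtD.py | AMI
-- ===== SOURCE A (Python) =====
-- def AMI(inp):
--     inp1 = list(inp)
--     flag = False
--     for i in range(len(inp1)):
--         if inp1[i] == 1 and not flag:
--             flag = True
--             continue
--         elif flag and inp1[i] == 1:
--             inp1[i] = -1
--             flag = False
--     return inp1
-- ===== SOURCE B (Python) =====
-- def AMI(inp):
--     result = list(inp)
--     ones = [i for i, v in enumerate(result) if v == 1]
--     for rank, idx in enumerate(ones):
--         if rank % 2 == 1:
--             result[idx] = -1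
--     return result
-- ===== Notes on version B (the rewrite author's own statement) =====
-- stated objective: idiomatic
-- what changed: A's single pass with a toggling flag is replaced by two passes: first collect the positions of all 1s, then set every odd-rank (2nd, 4th, ...) position to -1.
import Mathlib
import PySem

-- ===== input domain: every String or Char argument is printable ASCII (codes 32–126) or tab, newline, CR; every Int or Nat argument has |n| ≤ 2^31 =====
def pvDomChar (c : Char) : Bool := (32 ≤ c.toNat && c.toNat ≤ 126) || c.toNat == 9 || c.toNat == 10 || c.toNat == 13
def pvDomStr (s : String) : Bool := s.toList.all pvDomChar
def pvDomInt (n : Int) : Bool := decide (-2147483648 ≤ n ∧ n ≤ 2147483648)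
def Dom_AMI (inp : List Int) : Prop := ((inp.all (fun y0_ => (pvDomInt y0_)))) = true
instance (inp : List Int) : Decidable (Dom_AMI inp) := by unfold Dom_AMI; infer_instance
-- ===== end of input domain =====

-- B replaces A's single toggling-flag pass by two passes (collect the 1-positions, then negate
-- the odd-rank ones); same O(n) cost, a more idiomatic decomposition.

-- ===== PORT A =====
-- A's loop: for i in range(len(inp1)), state (inp1, flag), in-place inp1[i] = -1
def AMI (inp : List Int) : List Int :=
  let inp1 := inp
  ((PySem.List.pyRange 0 (inp1.length : Int) 1).foldl
    (fun (st : List Int × Bool) i =>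
      if PySem.List.pyGetD st.1 i 0 == 1 && !st.2 then (st.1, true)
      else if st.2 && (PySem.List.pyGetD st.1 i 0 == 1) then (PySem.List.pySetD st.1 i (-1), false)
      else st)
    (inp1, false)).1

-- ===== PORT B =====
def AMI_alt (inp : List Int) : List Int :=
  let result := inp
  let ones := ((PySem.List.enumerate result 0).filter (fun p => p.2 == 1)).map Prod.fst
  (PySem.List.enumerate ones 0).foldl
    (fun res p => if PySem.Int.mod p.1 2 == 1 then PySem.List.pySetD res p.2 (-1) else res)
    result

-- ===== PRECONDITION & SPEC =====
def Spec_AMI (inp : List Int) (out : List Int) : Prop := out = AMI_alt inp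
instance (inp : List Int) (out : List Int) : Decidable (Spec_AMI inp out) := by unfold Spec_AMI; infer_instance

-- ===== CLAIM (what is proved, stated in full; the proofs are below) =====
def Claim_equal_AMI : Prop := ∀ (inp : List Int), Dom_AMI inp → Spec_AMI inp (AMI inp)

-- ===== LEMMAS AND PROOFS =====

-- reference run: A's loop body as structural recursion (result list, final flag)
def runAMI (flag : Bool) : List Int → List Int × Bool
  | [] => ([], flag)
  | v :: vs =>
    if v == 1 && !flag then
      let r := runAMI true vs; (v :: r.1, r.2)
    else if flag && (v == 1) then
      let r := runAMI false vs; ((-1 : Int) :: r.1, r.2)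
    else
      let r := runAMI flag vs; (v :: r.1, r.2)

def stepA (st : List Int × Bool) (i : Int) : List Int × Bool :=
  if PySem.List.pyGetD st.1 i 0 == 1 && !st.2 then (st.1, true)
  else if st.2 && (PySem.List.pyGetD st.1 i 0 == 1) then (PySem.List.pySetD st.1 i (-1), false)
  else st

lemma getD_append_cons (pre : List Int) (v : Int) (vs : List Int) :
    (pre ++ v :: vs).getD pre.length 0 = v := by
  induction pre with
  | nil => rfl
  | cons p ps _ => simp

lemma set_append_cons (pre : List Int) (v w : Int) (vs : List Int) :
    (pre ++ v :: vs).set pre.length w = pre ++ w :: vs := by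
  induction pre with
  | nil => rfl
  | cons p ps ih => simp [ih]

lemma A_inv (inp : List Int) : ∀ (pre : List Int) (flag : Bool),
    (PySem.List.pyRange (pre.length : Int) ((pre.length + inp.length : Nat) : Int) 1).foldl
      stepA (pre ++ inp, flag)
    = (pre ++ (runAMI flag inp).1, (runAMI flag inp).2) := by
  induction inp with
  | nil =>
    intro pre flag
    rw [PySem.List.pyRange_one_eq_nil (by simp)]
    simp [runAMI]
  | cons v vs ih =>
    intro pre flag
    have hlt : (pre.length : Int) < ((pre.length + (v :: vs).length : Nat) : Int) := by
      push_cast [List.length_cons]; omega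
    rw [PySem.List.pyRange_one_cons hlt]
    have hget : PySem.List.pyGetD (pre ++ v :: vs) (pre.length : Int) 0 = v := by
      rw [PySem.List.pyGetD_natCast, getD_append_cons]
    have hbounds : ∀ w : Int, ((pre.length + (v :: vs).length : Nat) : Int)
        = (((pre ++ [w]).length + vs.length : Nat) : Int) := by
      intro w; push_cast [List.length_append, List.length_cons, List.length_nil]; ring
    have harg : ∀ w : Int, ((pre.length : Int) + 1) = (((pre ++ [w]).length : Nat) : Int) := by
      intro w; push_cast [List.length_append, List.length_cons, List.length_nil]; ring
    simp only [List.foldl_cons]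
    by_cases h1 : v = 1
    · subst h1
      cases flag with
      | false =>
        have hstep : stepA (pre ++ 1 :: vs, false) (pre.length : Int) = (pre ++ 1 :: vs, true) := by
          simp [stepA, hget]
        rw [hstep, hbounds 1, harg 1]
        have h2 := ih (pre ++ [(1 : Int)]) true
        rw [List.append_assoc] at h2
        simp only [List.singleton_append] at h2
        rw [h2]
        simp [runAMI, List.append_assoc]
      | true =>
        have hstep : stepA (pre ++ 1 :: vs, true) (pre.length : Int)
            = (pre ++ (-1 : Int) :: vs, false) := by
          simp only [stepA, hget]
          rw [PySem.List.pySetD_natCast, set_append_cons]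
          simp
        rw [hstep, hbounds (-1), harg (-1)]
        have h2 := ih (pre ++ [(-1 : Int)]) false
        rw [List.append_assoc] at h2
        simp only [List.singleton_append] at h2
        rw [h2]
        simp [runAMI, List.append_assoc]
    · have hstep : stepA (pre ++ v :: vs, flag) (pre.length : Int) = (pre ++ v :: vs, flag) := by
        simp [stepA, hget, h1]
      rw [hstep, hbounds v, harg v]
      have h2 := ih (pre ++ [v]) flag
      rw [List.append_assoc] at h2
      simp only [List.singleton_append] at h2
      rw [h2]
      simp [runAMI, h1, List.append_assoc]

lemma AMI_eq_run (inp : List Int) : AMI inp = (runAMI false inp).1 := by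
  have h := A_inv inp [] false
  simp only [List.length_nil, Nat.cast_zero, List.nil_append, Nat.zero_add] at h
  show ((PySem.List.pyRange 0 (inp.length : Int) 1).foldl stepA (inp, false)).1
      = (runAMI false inp).1
  rw [h]

-- B side
def onesF : List Int → Int → List Int
  | [], _ => []
  | v :: vs, s => if v == 1 then s :: onesF vs (s + 1) else onesF vs (s + 1)

lemma onesF_eq (inp : List Int) : ∀ s : Int,
    ((PySem.List.enumerate inp s).filter (fun p => p.2 == 1)).map Prod.fst = onesF inp s := by
  induction inp with
  | nil => intro s; simp [PySem.List.enumerate_nil, onesF]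
  | cons v vs ih =>
    intro s
    rw [PySem.List.enumerate_cons]
    by_cases h : v = 1 <;> simp [onesF, h, ih (s + 1)]

lemma onesF_shift (inp : List Int) : ∀ s : Int,
    onesF inp (s + 1) = (onesF inp s).map (· + 1) := by
  induction inp with
  | nil => intro s; simp [onesF]
  | cons v vs ih =>
    intro s
    by_cases h : v = 1 <;> simp [onesF, h, ih (s + 1), ih s]

lemma onesF_nonneg (inp : List Int) : ∀ s : Int, 0 ≤ s → ∀ i ∈ onesF inp s, 0 ≤ i := by
  induction inp with
  | nil => intro s _ i hi; simp [onesF] at hi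
  | cons v vs ih =>
    intro s hs i hi
    by_cases h : v = 1
    · simp only [onesF, h, beq_self_eq_true, if_true, List.mem_cons] at hi
      rcases hi with rfl | hi
      · exact hs
      · exact ih (s + 1) (by omega) i hi
    · simp only [onesF, beq_iff_eq, h, if_false] at hi
      exact ih (s + 1) (by omega) i hi

def stepB (res : List Int) (p : Int × Int) : List Int :=
  if PySem.Int.mod p.1 2 == 1 then PySem.List.pySetD res p.2 (-1) else res

-- stepB with Python's mod replaced by Int.emod (divisor 2 > 0)
def stepB' (res : List Int) (p : Int × Int) : List Int :=
  if p.1 % 2 = 1 then PySem.List.pySetD res p.2 (-1) else res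

lemma stepB_eq_stepB' : stepB = stepB' := by
  funext res p
  simp [stepB, stepB']

lemma pySetD_cons_succ (v : Int) (l : List Int) (i : Int) (hi : 0 ≤ i) (w : Int) :
    PySem.List.pySetD (v :: l) (i + 1) w = v :: PySem.List.pySetD l i w := by
  rw [PySem.List.pySetD_of_nonneg (v :: l) w (by omega), PySem.List.pySetD_of_nonneg l w hi]
  have h : (i + 1).toNat = i.toNat + 1 := by omega
  rw [h, List.set_cons_succ]

lemma g_shift (ones : List Int) : ∀ (t : Int) (v : Int) (l : List Int),
    (∀ i ∈ ones, 0 ≤ i) →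
    (PySem.List.enumerate (ones.map (· + 1)) t).foldl stepB' (v :: l)
      = v :: (PySem.List.enumerate ones t).foldl stepB' l := by
  induction ones with
  | nil => intro t v l _; simp [PySem.List.enumerate_nil]
  | cons i rest ih =>
    intro t v l hnn
    simp only [List.map_cons, PySem.List.enumerate_cons, List.foldl_cons]
    have hi : 0 ≤ i := hnn i (by simp)
    have hstep : stepB' (v :: l) (t, i + 1) = v :: stepB' l (t, i) := by
      show (if t % 2 = 1 then PySem.List.pySetD (v :: l) (i + 1) (-1) else v :: l)
          = v :: (if t % 2 = 1 then PySem.List.pySetD l i (-1) else l)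
      split_ifs with h
      · exact pySetD_cons_succ v l i hi (-1)
      · rfl
    rw [hstep, ih (t + 1) v (stepB' l (t, i)) (fun j hj => hnn j (by simp [hj]))]

lemma B_main (inp : List Int) : ∀ (t : Int) (b : Bool), (t % 2 = 1 ↔ b = true) →
    (PySem.List.enumerate (onesF inp 0) t).foldl stepB' inp = (runAMI b inp).1 := by
  induction inp with
  | nil => intro t b _; cases b <;> simp [onesF, PySem.List.enumerate_nil, runAMI]
  | cons v vs ih =>
    intro t b hb
    have hmod : t % 2 = 0 ∨ t % 2 = 1 := by omega
    have hflip : (t + 1) % 2 = 1 ↔ (!b) = true := by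
      cases b <;> simp at hb ⊢ <;> omega
    by_cases h : v = 1
    · subst h
      have hones : onesF ((1 : Int) :: vs) 0 = 0 :: (onesF vs 0).map (· + 1) := by
        have h1 : onesF ((1 : Int) :: vs) 0 = 0 :: onesF vs (0 + 1) := by simp [onesF]
        rw [h1, onesF_shift vs 0]
      rw [hones, PySem.List.enumerate_cons, List.foldl_cons]
      have hstep : stepB' ((1 : Int) :: vs) (t, 0)
          = (if t % 2 = 1 then (-1 : Int) else 1) :: vs := by
        show (if t % 2 = 1 then PySem.List.pySetD ((1 : Int) :: vs) 0 (-1) else (1 : Int) :: vs)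
            = (if t % 2 = 1 then (-1 : Int) else 1) :: vs
        split_ifs with hm
        · rw [PySem.List.pySetD_of_nonneg ((1 : Int) :: vs) (-1) le_rfl]; rfl
        · rfl
      rw [hstep]
      cases b with
      | false =>
        have hm : ¬ t % 2 = 1 := by simpa using hb
        rw [if_neg hm]
        rw [g_shift (onesF vs 0) (t + 1) 1 vs (onesF_nonneg vs 0 le_rfl)]
        rw [ih (t + 1) true (by simpa using hflip)]
        simp [runAMI]
      | true =>
        have hm : t % 2 = 1 := hb.mpr rfl
        rw [if_pos hm]
        rw [g_shift (onesF vs 0) (t + 1) (-1) vs (onesF_nonneg vs 0 le_rfl)]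
        rw [ih (t + 1) false (by simpa using hflip)]
        simp [runAMI]
    · have hones : onesF (v :: vs) 0 = (onesF vs 0).map (· + 1) := by
        have h1 : onesF (v :: vs) 0 = onesF vs (0 + 1) := by simp [onesF, h]
        rw [h1, onesF_shift vs 0]
      rw [hones, g_shift (onesF vs 0) t v vs (onesF_nonneg vs 0 le_rfl)]
      rw [ih t b hb]
      cases b <;> simp [runAMI, h]

lemma AMI_alt_eq_run (inp : List Int) : AMI_alt inp = (runAMI false inp).1 := by
  show (PySem.List.enumerate
      (((PySem.List.enumerate inp 0).filter (fun p => p.2 == 1)).map Prod.fst) 0).foldl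
      stepB inp = (runAMI false inp).1
  rw [onesF_eq inp 0, stepB_eq_stepB']
  exact B_main inp 0 false (by norm_num)

-- ===== VERDICT (by name: the statement is the Claim_ definition above) =====
theorem AMI_spec : Claim_equal_AMI := by
  intro inp _
  unfold Spec_AMI
  rw [AMI_eq_run, AMI_alt_eq_run]
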